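-- pv_equiv track=rewrite | github.com/jaewonE/llm_flask_chatbot_server | models/koalpaca.py | extract_nth_occurrence
-- ===== SOURCE A (Python) =====
-- def extract_nth_occurrence(input_text: str, keyword: str, n: int) -> str:
--     # Find the starting index of the nth occurrence of the keyword
--     current_index = -1
--     for _ in range(n):
--         current_index = input_text.find(keyword, current_index + 1)
--         if current_index == -1:
--             break
--
--     if current_index == -1:
--         # If nth occurrence not found, find the last occurrence
--         current_index = input_text.rfind(keyword)
--
--     # Extract and return the substring starting from the found occurrence till the end
--     return input_text[current_index:] if current_index != -1 else ""
-- ===== SOURCE B (Python) =====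
-- def extract_nth_occurrence(input_text: str, keyword: str, n: int) -> str:
--     # One collecting scan: every start index of keyword (overlapping), in order.
--     indices = []
--     start = 0
--     while True:
--         i = input_text.find(keyword, start)
--         if i == -1:
--             break
--         indices.append(i)
--         start = i + 1
--     if 1 <= n <= len(indices):
--         idx = indices[n - 1]
--     elif indices:
--         idx = indices[-1]
--     else:
--         idx = -1
--     return input_text[idx:] if idx != -1 else ""
-- ===== Notes on version B (the rewrite author's own statement) =====
-- stated objective: alternative
-- what changed: B replaces A's n targeted find() calls plus a separate rfind() fallback by a single scan that collects every (overlapping) occurrence start index into a list, then selects indices[n-1] or falls back to the last collected index.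
import Mathlib
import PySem

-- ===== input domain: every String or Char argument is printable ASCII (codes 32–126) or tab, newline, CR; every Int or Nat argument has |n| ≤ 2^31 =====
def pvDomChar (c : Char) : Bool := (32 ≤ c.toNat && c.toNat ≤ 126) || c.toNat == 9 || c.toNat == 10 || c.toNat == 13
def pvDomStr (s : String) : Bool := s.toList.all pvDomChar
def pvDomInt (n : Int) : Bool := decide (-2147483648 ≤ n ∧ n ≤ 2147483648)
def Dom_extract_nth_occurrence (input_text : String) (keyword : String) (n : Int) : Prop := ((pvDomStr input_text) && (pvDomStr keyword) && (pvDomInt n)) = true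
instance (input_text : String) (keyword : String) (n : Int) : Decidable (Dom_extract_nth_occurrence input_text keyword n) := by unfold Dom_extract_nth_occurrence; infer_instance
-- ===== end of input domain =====

-- B replaces A's n targeted finds plus a separate rfind fallback by ONE collecting scan of all
-- occurrence start indices followed by a list lookup (objective: alternative decomposition).

-- ===== PORT A =====
-- the 'for _ in range(n)' loop: current_index := find(keyword, current_index+1), break on -1
def pvA_loop (input_text keyword : String) : Nat → Int → Int
  | 0, cur => cur
  | Nat.succ k, cur =>
    let i := PySem.Str.findFrom input_text keyword (cur + 1) none
    if i = -1 then -1 else pvA_loop input_text keyword k i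

def extract_nth_occurrence (input_text : String) (keyword : String) (n : Int) : String :=
  let ci := pvA_loop input_text keyword n.toNat (-1)
  let ci := if ci = -1 then PySem.Str.rfind input_text keyword else ci
  if ci ≠ -1 then PySem.Str.slice input_text (some ci) none else ""

-- ===== PORT B =====
-- the collecting 'while True' scan; the fuel only makes it total (start grows each step)
def pvB_collect (input_text keyword : String) : Nat → Nat → List Int
  | 0, _ => []
  | Nat.succ f, start =>
    let i := PySem.Str.findFrom input_text keyword (start : Int) none
    if i = -1 then [] else i :: pvB_collect input_text keyword f (i.toNat + 1)

def extract_nth_occurrence_alt (input_text : String) (keyword : String) (n : Int) : String :=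
  let idxs := pvB_collect input_text keyword (input_text.length + 2) 0
  let idx : Int :=
    if 1 ≤ n ∧ n ≤ (idxs.length : Int) then (PySem.List.pyGet? idxs (n - 1)).getD (-1)
    else if idxs ≠ [] then (PySem.List.pyGet? idxs (-1)).getD (-1)
    else -1
  if idx ≠ -1 then PySem.Str.slice input_text (some idx) none else ""

-- ===== PRECONDITION & SPEC =====
def Spec_extract_nth_occurrence (input_text : String) (keyword : String) (n : Int) (out : String) : Prop := out = extract_nth_occurrence_alt input_text keyword n
instance (input_text : String) (keyword : String) (n : Int) (out : String) : Decidable (Spec_extract_nth_occurrence input_text keyword n out) := by unfold Spec_extract_nth_occurrence; infer_instance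

-- ===== CLAIM (what is proved, stated in full; the proofs are below) =====
def Claim_equal_extract_nth_occurrence : Prop := ∀ (input_text : String) (keyword : String) (n : Int), Dom_extract_nth_occurrence input_text keyword n → Spec_extract_nth_occurrence input_text keyword n (extract_nth_occurrence input_text keyword n)


-- ===== LEMMAS AND PROOFS =====

-- occurrence predicate: keyword starts at position j
def pvOcc (cs ks : List Char) (j : Nat) : Prop := ks <+: cs.drop j

theorem pv_findFrom_ge (cs ks : List Char) (s : Nat) (h : cs.length < s) :
    PySem.Chars.findFrom cs ks (s : Int) none = -1 := by
  unfold PySem.Chars.findFrom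
  have h2 : ¬ ((s : Int) < 0) := by omega
  have h3 : (cs.length : Int) < (s : Int) := by exact_mod_cast h
  simp [h2, h3]
theorem pv_find_step (cs ks : List Char) (s : Nat) (hs : s ≤ cs.length) :
    (PySem.Chars.findFrom cs ks (s : Int) none = -1 ∧ ∀ j, s ≤ j → ¬ pvOcc cs ks j) ∨
    (let i := PySem.Chars.findFrom cs ks (s : Int) none
     0 ≤ i ∧ (s : Int) ≤ i ∧ i ≤ cs.length ∧ pvOcc cs ks i.toNat ∧
       ∀ j, s ≤ j → j < i.toNat → ¬ pvOcc cs ks j) := by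
  by_cases h : PySem.Chars.findFrom cs ks (s : Int) none = -1
  · left
    refine ⟨h, ?_⟩
    rw [PySem.Chars.findFrom_natCast_eq_neg_one_iff cs ks s hs] at h
    intro j hj hocc
    apply h
    rw [← PySem.Chars.isIn_iff_infix, ← PySem.Chars.exists_prefix_drop_iff_isIn]
    exact ⟨j - s, by rw [List.drop_drop]; have : s + (j - s) = j := by omega
                     rw [this]; exact hocc⟩
  · right
    obtain ⟨h1, h2, h3⟩ := PySem.Chars.findFrom_natCast_spec cs ks s hs h
    have hle : PySem.Chars.findFrom cs ks (s : Int) none ≤ cs.length := by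
      rw [PySem.Chars.findFrom_natCast cs ks s hs]
      have := PySem.Chars.find_le_length (cs.drop s) ks
      simp at this ⊢
      split <;> omega
    exact ⟨by omega, h1, hle, h2, fun j hj hjlt => h3 j hj hjlt⟩
theorem pv_loop_eq_collect (it kw : String) (k f s : Nat)
    (hk : 1 ≤ k) (hf : it.toList.length + 2 ≤ s + f) (hs : s ≤ it.toList.length + 1) :
    pvA_loop it kw k ((s : Int) - 1) =
      (pvB_collect it kw f s).getD (k - 1) (-1) := by
  induction k generalizing f s with
  | zero => omega
  | succ k ih =>
    obtain ⟨f', rfl⟩ : ∃ f', f = f' + 1 := ⟨f - 1, by omega⟩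
    have hA : pvA_loop it kw (k + 1) ((s : Int) - 1) =
        (if PySem.Str.findFrom it kw (s : Int) none = -1 then -1
         else pvA_loop it kw k (PySem.Str.findFrom it kw (s : Int) none)) := by
      show (let i := PySem.Str.findFrom it kw (((s : Int) - 1) + 1) none
            if i = -1 then -1 else pvA_loop it kw k i) = _
      norm_num
    rw [hA]
    by_cases hneg : PySem.Str.findFrom it kw (s : Int) none = -1
    · simp [pvB_collect, ← PySem.Str.findFrom_eq, hneg]
    · -- found: s ≤ length and spec facts
      have hslen : s ≤ it.toList.length := by
        rcases Nat.lt_or_ge s (it.toList.length + 1) with h | h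
        · omega
        · exfalso; apply hneg
          rw [PySem.Str.findFrom_eq]
          exact pv_findFrom_ge it.toList kw.toList s (by omega)
      have hstep := pv_find_step it.toList kw.toList s hslen
      rw [← PySem.Str.findFrom_eq] at hstep
      rcases hstep with ⟨h1, _⟩ | ⟨h0, hsle, hle, _, _⟩
      · exact absurd h1 hneg
      · set i := PySem.Str.findFrom it kw (s : Int) none with hidef
        have hicast : i = ((i.toNat : Nat) : Int) := by omega
        have hBL : pvB_collect it kw (f' + 1) s = i :: pvB_collect it kw f' (i.toNat + 1) := by
          simp [pvB_collect, ← PySem.Str.findFrom_eq, ← hidef, hneg]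
        rw [hBL, if_neg hneg]
        cases k with
        | zero => simp [pvA_loop]
        | succ k' =>
          have harg : i = ((((i.toNat + 1 : Nat)) : Int) - 1) := by push_cast; omega
          conv_lhs => rw [harg]
          rw [ih (f := f') (s := i.toNat + 1) (by omega) (by omega) (by omega)]
          simp
theorem pv_collect_nonneg (it kw : String) (f : Nat) :
    ∀ s, ∀ x ∈ pvB_collect it kw f s, 0 ≤ x := by
  induction f with
  | zero => intro s x hx; simp [pvB_collect] at hx
  | succ f ih =>
    intro s x hx
    by_cases hneg : PySem.Str.findFrom it kw (s : Int) none = -1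
    · simp [pvB_collect, ← PySem.Str.findFrom_eq, hneg] at hx
    · simp only [pvB_collect, ← PySem.Str.findFrom_eq, if_neg hneg, List.mem_cons] at hx
      rcases hx with rfl | hx
      · -- x is the found index: ≥ 0 since ≠ -1 needs spec; use: findFrom result ≥ 0 or = -1
        by_cases hs : s ≤ it.toList.length
        · rcases pv_find_step it.toList kw.toList s hs with ⟨h1, _⟩ | ⟨h0, _⟩
          · rw [← PySem.Str.findFrom_eq] at h1; exact absurd h1 hneg
          · rw [PySem.Str.findFrom_eq]; exact h0
        · exfalso; apply hneg
          rw [PySem.Str.findFrom_eq]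
          exact pv_findFrom_ge it.toList kw.toList s (by omega)
      · exact ih _ x hx
theorem pv_rfind_go_spec (cs ks : List Char) (m : Nat) :
    (PySem.Chars.rfind.go cs ks m = -1 ∧ ∀ j, j ≤ m → ¬ pvOcc cs ks j) ∨
    (let r := PySem.Chars.rfind.go cs ks m
     0 ≤ r ∧ r.toNat ≤ m ∧ pvOcc cs ks r.toNat ∧
       ∀ j, r.toNat < j → j ≤ m → ¬ pvOcc cs ks j) := by
  induction m with
  | zero =>
    by_cases h : ks.isPrefixOf cs
    · right
      simp only [PySem.Chars.rfind.go, h, if_true]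
      refine ⟨by norm_num, by norm_num, ?_, by omega⟩
      simpa [pvOcc] using List.isPrefixOf_iff_prefix.mp h
    · left
      simp only [PySem.Chars.rfind.go, h, if_false]
      refine ⟨rfl, ?_⟩
      intro j hj
      interval_cases j
      simpa [pvOcc] using fun hp => h (List.isPrefixOf_iff_prefix.mpr hp)
  | succ m ih =>
    by_cases h : ks.isPrefixOf (cs.drop (m + 1))
    · right
      simp only [PySem.Chars.rfind.go, h, if_true]
      refine ⟨by positivity, by simp, ?_, by intro j h1 h2; omega⟩
      simpa [pvOcc] using List.isPrefixOf_iff_prefix.mp h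
    · have hno : ¬ pvOcc cs ks (m + 1) := by
        simpa [pvOcc] using fun hp => h (List.isPrefixOf_iff_prefix.mpr hp)
      have hgo : PySem.Chars.rfind.go cs ks (m + 1) = PySem.Chars.rfind.go cs ks m := by
        simp [PySem.Chars.rfind.go, h]
      rcases ih with ⟨h1, h2⟩ | ⟨h1, h2, h3, h4⟩
      · left
        refine ⟨hgo.trans h1, ?_⟩
        intro j hj
        rcases Nat.lt_or_ge j (m + 1) with hlt | hge
        · exact h2 j (by omega)
        · have : j = m + 1 := by omega
          rw [this]; exact hno
      · right
        rw [hgo]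
        refine ⟨h1, by omega, h3, ?_⟩
        intro j hj1 hj2
        rcases Nat.lt_or_ge j (m + 1) with hlt | hge
        · exact h4 j hj1 (by omega)
        · have : j = m + 1 := by omega
          rw [this]; exact hno
theorem pv_collect_last (it kw : String) (f : Nat) :
    ∀ s, it.toList.length + 2 ≤ s + f → s ≤ it.toList.length + 1 →
    (pvB_collect it kw f s = [] ∧ ∀ j, s ≤ j → j ≤ it.toList.length → ¬ pvOcc it.toList kw.toList j) ∨
    (∃ r, (pvB_collect it kw f s).getLast? = some r ∧ 0 ≤ r ∧ (s : Int) ≤ r ∧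
       r.toNat ≤ it.toList.length ∧ pvOcc it.toList kw.toList r.toNat ∧
       ∀ j, r.toNat < j → j ≤ it.toList.length → ¬ pvOcc it.toList kw.toList j) := by
  induction f with
  | zero => intro s hf hs; omega
  | succ f ih =>
    intro s hf hs
    by_cases hneg : PySem.Str.findFrom it kw (s : Int) none = -1
    · left
      refine ⟨by simp [pvB_collect, ← PySem.Str.findFrom_eq, hneg], ?_⟩
      intro j hj1 hj2
      have hslen : s ≤ it.toList.length := by omega
      rcases pv_find_step it.toList kw.toList s hslen with ⟨_, h2⟩ | ⟨h0, _⟩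
      · exact h2 j hj1
      · rw [← PySem.Str.findFrom_eq] at h0; omega
    · have hslen : s ≤ it.toList.length := by
        by_contra hgt
        exact hneg (by rw [PySem.Str.findFrom_eq]; exact pv_findFrom_ge it.toList kw.toList s (by omega))
      rcases pv_find_step it.toList kw.toList s hslen with ⟨h1, _⟩ | ⟨h0, hsle, hle, hocc, hmin⟩
      · rw [← PySem.Str.findFrom_eq] at h1; exact absurd h1 hneg
      · rw [← PySem.Str.findFrom_eq] at h0 hsle hle hocc hmin
        set i := PySem.Str.findFrom it kw (s : Int) none with hidef
        have hBL : pvB_collect it kw (f + 1) s = i :: pvB_collect it kw f (i.toNat + 1) := by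
          simp [pvB_collect, ← PySem.Str.findFrom_eq, ← hidef, hneg]
        rcases ih (i.toNat + 1) (by omega) (by omega) with ⟨hemp, hnone⟩ | ⟨r, hr, hr0, hrs, hrlen, hrocc, hrmax⟩
        · right
          refine ⟨i, ?_, h0, hsle, by omega, hocc, ?_⟩
          · rw [hBL, hemp]; rfl
          · intro j hj1 hj2
            exact hnone j (by omega) hj2
        · right
          refine ⟨r, ?_, hr0, by omega, hrlen, hrocc, hrmax⟩
          rw [hBL]
          rw [List.getLast?_cons]
          rcases h : pvB_collect it kw f (i.toNat + 1) with _ | ⟨y, l⟩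
          · rw [h] at hr; simp at hr
          · rw [h] at hr; simp [hr]
theorem pv_getD_last {l : List Int} : l.getD (l.length - 1) (-1) = l.getLast?.getD (-1) := by
  cases h : l.getLast? with
  | none => rw [List.getLast?_eq_none_iff] at h; simp [h]
  | some r =>
    have hne : l ≠ [] := by rintro rfl; simp at h
    rw [List.getLast?_eq_some_getLast hne] at h
    rw [List.getLast_eq_getElem] at h
    simp only [Option.getD_some]
    rw [List.getD_eq_getElem?_getD, List.getElem?_eq_getElem (by have := List.length_pos_iff.mpr hne; omega)]
    simp [← Option.some_inj.mp h]
theorem pv_rfind_eq_last (it kw : String) (f : Nat)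
    (hf : it.toList.length + 2 ≤ f) :
    PySem.Str.rfind it kw =
      (pvB_collect it kw f 0).getD ((pvB_collect it kw f 0).length - 1) (-1) := by
  rw [pv_getD_last]
  rw [PySem.Str.rfind_eq]
  show PySem.Chars.rfind.go it.toList kw.toList it.toList.length = _
  rcases pv_collect_last it kw f 0 (by omega) (by omega) with ⟨hemp, hnone⟩ | ⟨r, hr, hr0, _, hrlen, hrocc, hrmax⟩
  · rw [hemp]
    simp only [List.getLast?_nil, Option.getD_none]
    rcases pv_rfind_go_spec it.toList kw.toList it.toList.length with ⟨h1, _⟩ | ⟨_, h2, h3, _⟩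
    · exact h1
    · exact absurd h3 (hnone _ (by omega) h2)
  · rw [hr, Option.getD_some]
    rcases pv_rfind_go_spec it.toList kw.toList it.toList.length with ⟨h1, h2⟩ | ⟨g0, g2, g3, g4⟩
    · exact absurd hrocc (h2 _ hrlen)
    · set g := PySem.Chars.rfind.go it.toList kw.toList it.toList.length with hg
      have h5 : ¬ r.toNat < g.toNat := fun hlt => hrmax g.toNat hlt g2 g3
      have h6 : ¬ g.toNat < r.toNat := fun hlt => g4 r.toNat hlt hrlen hrocc
      omega
theorem pv_pyGet_neg1 (L : List Int) (hne : L ≠ []) :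
    (PySem.List.pyGet? L (-1)).getD (-1) = L.getD (L.length - 1) (-1) := by
  have hlen : 1 ≤ L.length := List.length_pos_iff.mpr hne
  unfold PySem.List.pyGet? PySem.List.pyIdx?
  have h1 : ¬ ((0 : Int) ≤ -1) := by omega
  have h2 : -(L.length : Int) ≤ -1 := by omega
  simp only [h1, if_false, h2, if_true, Option.bind_some]
  rw [List.getD_eq_getElem?_getD]
  norm_num

theorem pv_pyGet_nat (L : List Int) (n : Int) (h1 : 1 ≤ n) (h2 : n ≤ (L.length : Int)) :
    (PySem.List.pyGet? L (n - 1)).getD (-1) = L.getD (n.toNat - 1) (-1) := by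
  unfold PySem.List.pyGet? PySem.List.pyIdx?
  have h3 : (0 : Int) ≤ n - 1 := by omega
  have h4 : n - 1 < (L.length : Int) := by omega
  simp only [h3, if_true, if_pos h4, Option.bind_some]
  rw [List.getD_eq_getElem?_getD]
  congr 2
  omega

-- ===== VERDICT (by name: the statement is the Claim_ definition above) =====
theorem extract_nth_occurrence_spec : Claim_equal_extract_nth_occurrence := by
  intro it kw n _
  unfold Spec_extract_nth_occurrence extract_nth_occurrence extract_nth_occurrence_alt
  simp only []
  have hlen : it.length = it.toList.length := by simp
  have hid : (if pvA_loop it kw n.toNat (-1) = -1 then PySem.Str.rfind it kw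
        else pvA_loop it kw n.toNat (-1)) =
      (if 1 ≤ n ∧ n ≤ ((pvB_collect it kw (it.length + 2) 0).length : Int)
        then (PySem.List.pyGet? (pvB_collect it kw (it.length + 2) 0) (n - 1)).getD (-1)
        else if pvB_collect it kw (it.length + 2) 0 ≠ []
          then (PySem.List.pyGet? (pvB_collect it kw (it.length + 2) 0) (-1)).getD (-1)
          else -1) := by
    set L := pvB_collect it kw (it.length + 2) 0 with hL
    have hR : PySem.Str.rfind it kw = L.getD (L.length - 1) (-1) :=
      pv_rfind_eq_last it kw (it.length + 2) (by omega)
    have hmem : ∀ k, k < L.length → 0 ≤ L.getD k (-1) := by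
      intro k hk
      rw [List.getD_eq_getElem?_getD, List.getElem?_eq_getElem hk]
      exact pv_collect_nonneg it kw (it.length + 2) 0 _ (List.getElem_mem hk)
    have hfall : PySem.Str.rfind it kw =
        (if L ≠ [] then (PySem.List.pyGet? L (-1)).getD (-1) else -1) := by
      by_cases hne : L = []
      · rw [if_neg (by simp [hne]), hR, hne]; rfl
      · rw [if_pos hne, pv_pyGet_neg1 L hne, hR]
    by_cases hn1 : 1 ≤ n
    · have hA : pvA_loop it kw n.toNat (-1) = L.getD (n.toNat - 1) (-1) := by
        have h := pv_loop_eq_collect it kw n.toNat (it.length + 2) 0 (by omega) (by omega) (by omega)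
        norm_num at h
        rw [h, hL, List.getD_eq_getElem?_getD]
      by_cases hn2 : n ≤ (L.length : Int)
      · have hrange : n.toNat - 1 < L.length := by omega
        have hpos := hmem _ hrange
        rw [hA, if_neg (by omega), if_pos ⟨hn1, hn2⟩, pv_pyGet_nat L n hn1 hn2]
      · have hout : L.getD (n.toNat - 1) (-1) = -1 := by
          rw [List.getD_eq_getElem?_getD, List.getElem?_eq_none (by omega)]; rfl
        rw [hA, hout, if_pos rfl, if_neg (by intro h; exact hn2 h.2)]
        exact hfall
    · have h0 : n.toNat = 0 := by omega
      rw [h0]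
      have hA : pvA_loop it kw 0 (-1) = -1 := rfl
      rw [hA, if_pos rfl, if_neg (by intro h; exact hn1 h.1)]
      exact hfall
  rw [hid]
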